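-- pv_equiv track=rewrite | github.com/MaxiLargo/Python | Soluciones/Guia7/Ejercicio1.py | hay3vocalesdistintas
-- ===== SOURCE A (Python) =====
-- def hay3vocalesdistintas(palabra:str)->bool:
--     res:bool = False
--     k:int = 0
--     vocales:list = ["a","e","i","o","u"]
--     for i in palabra:
--         if i in vocales:
--             vocales.remove(i)
--             k+=1
--     if k >= 3:
--         res = True
--     return res
-- ===== SOURCE B (Python) =====
-- def hay3vocalesdistintas(palabra: str) -> bool:
--     return sum(1 for v in "aeiou" if v in palabra) >= 3
-- ===== Notes on version B (the rewrite author's own statement) =====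
-- stated objective: simpler
-- what changed: B loops over the fixed vowel alphabet and counts which vowels occur in the word (five C-level membership tests), instead of A's per-character pass over the word that removes matched vowels from a mutable list.
import Mathlib
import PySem

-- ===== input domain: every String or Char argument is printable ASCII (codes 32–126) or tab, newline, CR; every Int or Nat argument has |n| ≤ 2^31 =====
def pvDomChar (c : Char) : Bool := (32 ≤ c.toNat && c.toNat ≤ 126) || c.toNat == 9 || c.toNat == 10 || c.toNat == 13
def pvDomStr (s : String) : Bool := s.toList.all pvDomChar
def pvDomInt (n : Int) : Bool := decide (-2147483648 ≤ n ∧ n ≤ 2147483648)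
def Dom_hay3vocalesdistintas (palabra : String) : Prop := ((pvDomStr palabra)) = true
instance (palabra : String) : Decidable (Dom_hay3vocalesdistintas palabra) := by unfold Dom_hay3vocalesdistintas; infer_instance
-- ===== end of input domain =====

-- B counts, over the fixed vowel alphabet, which vowels occur in the word, instead of A's
-- pass over the word removing matched vowels from a mutable list; simpler decomposition.


-- ===== PORT A =====
-- loop state: (vocales, k); `vocales.remove(i)` is List.erase (exact: the guard `i ∈ vocales`
-- guarantees membership, so Python's remove succeeds and drops the first occurrence)
def hay3vocalesdistintas (palabra : String) : Bool :=
  let st := palabra.toList.foldl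
    (fun (st : List Char × Int) i => if i ∈ st.1 then (st.1.erase i, st.2 + 1) else st)
    (['a', 'e', 'i', 'o', 'u'], 0)
  if st.2 ≥ 3 then true else false

-- ===== PORT B =====
-- sum(1 for v in "aeiou" if v in palabra) ported as countP over the vowel string
def hay3vocalesdistintas_alt (palabra : String) : Bool :=
  decide (3 ≤ "aeiou".toList.countP (fun v => v ∈ palabra.toList))

-- ===== PRECONDITION & SPEC =====
def Spec_hay3vocalesdistintas (palabra : String) (out : Bool) : Prop := out = hay3vocalesdistintas_alt palabra
instance (palabra : String) (out : Bool) : Decidable (Spec_hay3vocalesdistintas palabra out) := by unfold Spec_hay3vocalesdistintas; infer_instance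

-- ===== CLAIM (what is proved, stated in full; the proofs are below) =====
def Claim_equal_hay3vocalesdistintas : Prop := ∀ (palabra : String), Dom_hay3vocalesdistintas palabra → Spec_hay3vocalesdistintas palabra (hay3vocalesdistintas palabra)

-- ===== LEMMAS AND PROOFS =====

-- A's loop invariant: the counter ends at k plus the number of candidate vowels that occur in
-- the rest of the word (the candidate list stays duplicate-free, so each vowel counts once).
theorem loop_count (l : List Char) (vs : List Char) (k : Int) (hnd : vs.Nodup) :
    (l.foldl (fun (st : List Char × Int) i => if i ∈ st.1 then (st.1.erase i, st.2 + 1) else st)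
      (vs, k)).2 = k + (vs.countP (fun v => v ∈ l) : Int) := by
  induction l generalizing vs k with
  | nil => simp
  | cons c l ih =>
    by_cases hc : c ∈ vs
    · simp only [List.foldl_cons, hc, if_pos]
      rw [ih (vs.erase c) (k + 1) (hnd.erase c)]
      have hperm : vs.countP (fun v => v ∈ c :: l) = ((c :: vs.erase c).countP (fun v => v ∈ c :: l)) :=
        (List.perm_cons_erase hc).countP_eq _
      have hcongr : (vs.erase c).countP (fun v => v ∈ c :: l) = (vs.erase c).countP (fun v => v ∈ l) := by
        apply List.countP_congr
        intro v hv
        have hne : v ≠ c := ((List.Nodup.mem_erase_iff hnd).mp hv).1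
        simp [List.mem_cons, hne]
      rw [hperm, List.countP_cons, hcongr, if_pos (by simp : decide (c ∈ c :: l) = true)]
      push_cast
      ring
    · simp only [List.foldl_cons, hc, if_neg, not_false_iff]
      rw [ih vs k hnd]
      have hcongr : vs.countP (fun v => v ∈ c :: l) = vs.countP (fun v => v ∈ l) := by
        apply List.countP_congr
        intro v hv
        have hne : v ≠ c := fun h => hc (h ▸ hv)
        simp [List.mem_cons, hne]
      rw [hcongr]

-- ===== VERDICT (by name: the statement is the Claim_ definition above) =====
theorem hay3vocalesdistintas_spec : Claim_equal_hay3vocalesdistintas := by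
  intro palabra _
  unfold Spec_hay3vocalesdistintas
  simp only [hay3vocalesdistintas, hay3vocalesdistintas_alt]
  have hvs : ("aeiou".toList) = ['a', 'e', 'i', 'o', 'u'] := rfl
  rw [hvs]
  rw [loop_count palabra.toList ['a', 'e', 'i', 'o', 'u'] 0 (by decide)]
  set n := (['a', 'e', 'i', 'o', 'u'].countP (fun v => v ∈ palabra.toList)) with hn
  by_cases h : 3 ≤ n <;> simp [h]
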